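-- pv_equiv track=rewrite | github.com/schlogl2017/Prokamers | kmer_model_funcs.py | get_inter_kmer_distance
-- ===== SOURCE A (Python) =====
-- from itertools import product, islice, pairwise
--
-- def get_inter_kmer_distance(seq, kmer):
--     lk = len(kmer)
--     starts = []
--     for i, _ in enumerate(seq):
--         subseq = seq[i:i+lk]
--         if subseq == kmer:
--             starts.append(i)
--     dist = [end - start for start, end in pairwise(starts)]
--     return dist, starts
-- ===== SOURCE B (Python) =====
-- def get_inter_kmer_distance(seq, kmer):
--     starts = []
--     p = seq.find(kmer)
--     while p != -1:
--         starts.append(p)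
--         p = seq.find(kmer, p + 1)
--     dist = [end - start for start, end in zip(starts, starts[1:])]
--     return dist, starts
-- ===== Notes on version B (the rewrite author's own statement) =====
-- stated objective: faster
-- what changed: B replaces A's per-position slice-and-compare scan (slice of length k at every index) with a repeated str.find loop that jumps from one occurrence to the next (find from previous hit + 1), computing the gaps from adjacent pairs of the collected starts.
-- outside the precondition, e.g. on get_inter_kmer_distance('ab', ''): A returns ([1], [0, 1]), B returns ([1, 1], [0, 1, 2])
import Mathlib
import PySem

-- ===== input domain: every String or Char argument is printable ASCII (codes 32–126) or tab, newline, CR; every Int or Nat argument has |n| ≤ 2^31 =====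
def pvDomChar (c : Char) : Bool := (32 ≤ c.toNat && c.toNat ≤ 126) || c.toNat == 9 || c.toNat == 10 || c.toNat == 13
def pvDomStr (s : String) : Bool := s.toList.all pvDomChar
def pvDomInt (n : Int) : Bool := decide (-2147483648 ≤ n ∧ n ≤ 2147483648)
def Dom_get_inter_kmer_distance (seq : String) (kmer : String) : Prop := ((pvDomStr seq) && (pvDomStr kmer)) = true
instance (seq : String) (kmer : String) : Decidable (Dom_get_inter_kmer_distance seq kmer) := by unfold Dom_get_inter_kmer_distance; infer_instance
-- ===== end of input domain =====

-- B replaces A's per-position slice-and-compare scan with a repeated find loop (next search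
-- starts at previous hit + 1); proved equal to A for every non-empty kmer.

-- ===== PORT A =====
def get_inter_kmer_distance (seq : String) (kmer : String) : List Int × List Int :=
  let s := seq.toList
  let k := kmer.toList
  let lk : Int := PySem.Chars.len k
  let starts : List Int := (PySem.List.enumerate s 0).foldl
      (fun acc ic =>
        let subseq := PySem.Chars.slice s (some ic.1) (some (ic.1 + lk))
        if subseq = k then acc ++ [ic.1] else acc) []
  let dist : List Int := (starts.zip starts.tail).map (fun se => se.2 - se.1)
  (dist, starts)

-- ===== PORT B =====
-- termination fact for the find loop: a hit lies at or after the start position, which is ≤ length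
theorem pvFindFrom_ne_neg_one (s k : List Char) (p : Nat)
    (h : PySem.Chars.findFrom s k (p : Int) none ≠ -1) :
    p ≤ s.length ∧ (p : Int) ≤ PySem.Chars.findFrom s k (p : Int) none := by
  by_cases hp : p ≤ s.length
  · exact ⟨hp, (PySem.Chars.findFrom_natCast_spec s k p hp h).1⟩
  · exfalso
    apply h
    simp only [PySem.Chars.findFrom]
    have h0 : ¬ ((p : Int) < 0) := by omega
    simp only [h0, if_false]
    rw [if_pos (by exact_mod_cast Nat.lt_of_not_le hp)]

-- the while loop of B: collect successive find positions, searching from previous hit + 1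
def pvAltLoop (s k : List Char) (p : Nat) (acc : List Int) : List Int :=
  let j := PySem.Chars.findFrom s k (p : Int) none
  if h : j = -1 then acc
  else pvAltLoop s k (j.toNat + 1) (acc ++ [j])
  termination_by s.length + 1 - p
  decreasing_by
    have := pvFindFrom_ne_neg_one s k p h
    omega

def get_inter_kmer_distance_alt (seq : String) (kmer : String) : List Int × List Int :=
  let s := seq.toList
  let k := kmer.toList
  let starts : List Int := pvAltLoop s k 0 []
  let dist : List Int := (starts.zip (PySem.List.slice starts (some 1) none)).map
      (fun se => se.2 - se.1)
  (dist, starts)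

-- ===== PRECONDITION & SPEC =====
-- Pre_ excludes the empty kmer, a degenerate corner where the number of occurrences of the
-- empty pattern is a pure convention: A lists positions 0..len(seq)-1 while B's find loop
-- lists Python's convention 0..len(seq); both are defensible and neither is specified.
def Pre_get_inter_kmer_distance (seq : String) (kmer : String) : Prop := kmer ≠ ""
instance (seq : String) (kmer : String) : Decidable (Pre_get_inter_kmer_distance seq kmer) := by unfold Pre_get_inter_kmer_distance; infer_instance
def pvWitness_get_inter_kmer_distance : String × String := ("ABABAB", "ABA")

def Spec_get_inter_kmer_distance (seq : String) (kmer : String) (out : List Int × List Int) : Prop := out = get_inter_kmer_distance_alt seq kmer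
instance (seq : String) (kmer : String) (out : List Int × List Int) : Decidable (Spec_get_inter_kmer_distance seq kmer out) := by unfold Spec_get_inter_kmer_distance; infer_instance

-- ===== CLAIM (what is proved, stated in full; the proofs are below) =====
def Claim_equal_get_inter_kmer_distance : Prop := ∀ (seq : String) (kmer : String), Dom_get_inter_kmer_distance seq kmer → Pre_get_inter_kmer_distance seq kmer → Spec_get_inter_kmer_distance seq kmer (get_inter_kmer_distance seq kmer)

-- ===== LEMMAS AND PROOFS =====

-- the positions at which kmer occurs in seq (as naturals)
def pvMatchIdx (s k : List Char) : List Nat :=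
  (List.range s.length).filter (fun i => decide (k <+: s.drop i))

theorem pvMatchIdx_lt (s k : List Char) {i : Nat} (hi : i ∈ pvMatchIdx s k) : i < s.length := by
  have := List.mem_filter.mp hi
  exact List.mem_range.mp this.1

theorem pvMatchIdx_prefix (s k : List Char) {i : Nat} (hi : i ∈ pvMatchIdx s k) :
    k <+: s.drop i := by
  have := List.mem_filter.mp hi
  exact of_decide_eq_true this.2

theorem pvMatchIdx_pairwise (s k : List Char) : (pvMatchIdx s k).Pairwise (· < ·) :=
  List.Pairwise.sublist List.filter_sublist List.pairwise_lt_range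

-- splitting a strictly increasing list at its least element ≥ p
theorem pvSplitMin {p m : Nat} (l : List Nat) (hl : l.Pairwise (· < ·)) (hm : m ∈ l)
    (hp : p ≤ m) (hmin : ∀ x ∈ l, p ≤ x → m ≤ x) :
    l.filter (fun x => decide (p ≤ x)) = m :: l.filter (fun x => decide (m + 1 ≤ x)) := by
  induction l with
  | nil => cases hm
  | cons a t ih =>
    have hpair := List.pairwise_cons.mp hl
    rcases List.mem_cons.mp hm with hma | hmt
    · subst hma
      have h1 : t.filter (fun x => decide (p ≤ x)) = t := by
        apply List.filter_eq_self.mpr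
        intro x hx
        exact decide_eq_true (le_trans hp (le_of_lt (hpair.1 x hx)))
      have h2 : t.filter (fun x => decide (m < x)) = t := by
        apply List.filter_eq_self.mpr
        intro x hx
        exact decide_eq_true (hpair.1 x hx)
      simp [hp, h1, h2]
    · have ham : a < m := hpair.1 m hmt
      have hpa : ¬ p ≤ a := by
        intro hpa
        exact absurd (hmin a (by simp) hpa) (by omega)
      have : t.filter (fun x => decide (p ≤ x)) = m :: t.filter (fun x => decide (m + 1 ≤ x)) :=
        ih hpair.2 hmt (fun x hx hpx => hmin x (by simp [hx]) hpx)
      simp [List.filter_cons, hpa, this]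
      omega

-- A's membership test, rewritten as a prefix condition
theorem pvCondIff (s k : List Char) (j : Nat) :
    (PySem.Chars.slice s (some (j : Int)) (some ((j : Int) + PySem.Chars.len k)) = k) ↔
      k <+: s.drop j := by
  rw [PySem.Chars.len_eq, PySem.Chars.slice_eq_listSlice, PySem.List.slice_natCast_add,
    List.prefix_iff_eq_take]
  exact eq_comm

theorem pvAltLoop_eq (s k : List Char) (hk : k ≠ []) : ∀ (p : Nat) (acc : List Int),
    pvAltLoop s k p acc =
      acc ++ ((pvMatchIdx s k).filter (fun i => decide (p ≤ i))).map (fun i => (i : Int)) := by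
  intro p acc
  induction p, acc using pvAltLoop.induct s k with
  | case1 p acc j hj =>
    have hj' : PySem.Chars.findFrom s k (p : Int) none = -1 := hj
    rw [pvAltLoop]
    simp only [hj', reduceDIte]
    have hempty : (pvMatchIdx s k).filter (fun i => decide (p ≤ i)) = [] := by
      apply List.filter_eq_nil_iff.mpr
      intro i hi
      simp only [decide_eq_true_eq]
      by_cases hp : p ≤ s.length
      · intro hpi
        have hno : ¬ k <:+: s.drop p :=
          (PySem.Chars.findFrom_natCast_eq_neg_one_iff s k p hp).mp hj'
        apply hno
        rw [← PySem.Chars.isIn_iff_infix, ← PySem.Chars.exists_prefix_drop_iff_isIn]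
        refine ⟨i - p, ?_⟩
        rw [List.drop_drop, show p + (i - p) = i from by omega]
        exact pvMatchIdx_prefix s k hi
      · have := pvMatchIdx_lt s k hi
        omega
    rw [hempty]
    simp
  | case2 p acc j hne ih =>
    have hne' : PySem.Chars.findFrom s k (p : Int) none ≠ -1 := hne
    have hp : p ≤ s.length := (pvFindFrom_ne_neg_one s k p hne').1
    have hfne : PySem.Chars.find (s.drop p) k ≠ -1 := by
      intro hf
      apply hne'
      rw [PySem.Chars.findFrom_natCast s k p hp, if_pos hf]
    have hj : PySem.Chars.findFrom s k (p : Int) none =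
        (p : Int) + PySem.Chars.find (s.drop p) k := by
      rw [PySem.Chars.findFrom_natCast s k p hp, if_neg hfne]
    have hf0 : 0 ≤ PySem.Chars.find (s.drop p) k := by
      rw [PySem.Chars.find_nonneg_iff]
      exact (PySem.Chars.find_ne_neg_one_iff _ _).mp hfne
    have hspec := PySem.Chars.find_spec hf0
    have hjm : PySem.Chars.findFrom s k (p : Int) none =
        ((p + (PySem.Chars.find (s.drop p) k).toNat : Nat) : Int) := by
      rw [hj]
      push_cast
      omega
    have hprefm : k <+: s.drop (p + (PySem.Chars.find (s.drop p) k).toNat) := by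
      have h1 := hspec.1
      rwa [List.drop_drop] at h1
    have hmlt : p + (PySem.Chars.find (s.drop p) k).toNat < s.length := by
      by_contra hge
      rw [List.drop_eq_nil_of_le (by omega)] at hprefm
      exact hk (List.prefix_nil.mp hprefm)
    have hmem : p + (PySem.Chars.find (s.drop p) k).toNat ∈ pvMatchIdx s k := by
      unfold pvMatchIdx
      rw [List.mem_filter]
      exact ⟨List.mem_range.mpr hmlt, decide_eq_true hprefm⟩
    have hmin : ∀ x ∈ pvMatchIdx s k, p ≤ x →
        p + (PySem.Chars.find (s.drop p) k).toNat ≤ x := by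
      intro x hx hpx
      by_contra hlt
      apply hspec.2 (x - p) (by omega)
      rw [List.drop_drop, show p + (x - p) = x from by omega]
      exact pvMatchIdx_prefix s k hx
    have hsplit := pvSplitMin (p := p)
      (m := p + (PySem.Chars.find (s.drop p) k).toNat) (pvMatchIdx s k)
      (pvMatchIdx_pairwise s k) hmem (by omega) hmin
    have ih' := ih
    rw [show j = PySem.Chars.findFrom s k (p : Int) none from rfl, hjm] at ih'
    simp only [Int.toNat_natCast] at ih'
    rw [pvAltLoop]
    simp only [dif_neg hne']
    rw [hjm]
    simp only [Int.toNat_natCast]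
    rw [ih', hsplit]
    simp

theorem pvPortA_starts (s k : List Char) :
    (PySem.List.enumerate s 0).foldl
      (fun acc ic =>
        let subseq := PySem.Chars.slice s (some ic.1) (some (ic.1 + PySem.Chars.len k))
        if subseq = k then acc ++ [ic.1] else acc) [] =
    (pvMatchIdx s k).map (fun i => (i : Int)) := by
  have aux : ∀ (t : List Char) (j : Nat) (acc : List Int),
      (PySem.List.enumerate t (j : Int)).foldl
        (fun acc ic =>
          let subseq := PySem.Chars.slice s (some ic.1) (some (ic.1 + PySem.Chars.len k))
          if subseq = k then acc ++ [ic.1] else acc) acc =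
      acc ++ ((List.range' j t.length).filter (fun i => decide (k <+: s.drop i))).map
          (fun i => (i : Int)) := by
    intro t
    induction t with
    | nil => intro j acc; simp [PySem.List.enumerate]
    | cons c t iht =>
      intro j acc
      rw [PySem.List.enumerate_cons, List.foldl_cons]
      have hcast : (j : Int) + 1 = ((j + 1 : Nat) : Int) := by push_cast; ring
      rw [hcast, iht (j + 1)]
      rw [show (c :: t).length = t.length + 1 from rfl, List.range'_succ, List.filter_cons]
      by_cases hc : k <+: s.drop j
      · rw [if_pos ((pvCondIff s k j).mpr hc)]
        simp [hc]
      · rw [if_neg (fun he => hc ((pvCondIff s k j).mp he))]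
        simp [hc]
  have h0 := aux s 0 []
  rw [show ((0 : Nat) : Int) = (0 : Int) from rfl] at h0
  rw [h0]
  unfold pvMatchIdx
  rw [List.range_eq_range']
  simp

-- ===== VERDICT (by name: the statement is the Claim_ definition above) =====
theorem get_inter_kmer_distance_spec : Claim_equal_get_inter_kmer_distance := by
  intro seq kmer _ hpre
  unfold Spec_get_inter_kmer_distance
  have hk : kmer.toList ≠ [] := by
    intro h
    exact hpre (String.toList_eq_nil_iff.mp h)
  have hB := pvAltLoop_eq seq.toList kmer.toList hk 0 []
  have hfilter : (pvMatchIdx seq.toList kmer.toList).filter (fun i => decide (0 ≤ i)) =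
      pvMatchIdx seq.toList kmer.toList := by
    apply List.filter_eq_self.mpr
    intro x _
    exact decide_eq_true (Nat.zero_le x)
  rw [hfilter] at hB
  simp only [List.nil_append] at hB
  simp only [get_inter_kmer_distance, get_inter_kmer_distance_alt]
  rw [pvPortA_starts, hB, PySem.List.slice_from_one]
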